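-- pv_equiv track=rewrite | github.com/pallamidessi/OW-tech-test | main.py | compute_cost_third_vowels
-- ===== SOURCE A (Python) =====
-- def compute_cost_third_vowels(text):
--     text = text.lower()
--     vowels = {'a', 'e', 'i', 'o', 'u'}
--     total_cost = 0
--     for i, character in enumerate(text):
--         if i % 3 == 0:
--             if character in vowels:
--                 total_cost += 30
--
--     return total_cost
-- ===== SOURCE B (Python) =====
-- def compute_cost_third_vowels(text):
--     s = text.lower()[::3]
--     return 30 * sum(s.count(v) for v in 'aeiou')
-- ===== Notes on version B (the rewrite author's own statement) =====
-- stated objective: faster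
-- what changed: Replaces the guarded per-character Python loop (index % 3 check plus set membership per char) by building the stride-3 slice once and summing five str.count scans per vowel, moving the work into C-level builtins.
import Mathlib
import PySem

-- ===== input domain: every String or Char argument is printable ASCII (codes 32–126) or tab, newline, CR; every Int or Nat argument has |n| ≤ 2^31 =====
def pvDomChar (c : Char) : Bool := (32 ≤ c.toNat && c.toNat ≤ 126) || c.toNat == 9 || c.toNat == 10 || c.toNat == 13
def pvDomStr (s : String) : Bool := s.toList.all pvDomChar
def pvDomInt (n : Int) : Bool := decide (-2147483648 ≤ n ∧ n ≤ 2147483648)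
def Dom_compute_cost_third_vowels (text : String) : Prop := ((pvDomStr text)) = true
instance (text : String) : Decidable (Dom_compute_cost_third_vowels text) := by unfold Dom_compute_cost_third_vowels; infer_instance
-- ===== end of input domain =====

-- B builds the stride-3 slice once and sums five per-vowel count scans instead of
-- A's guarded per-character pass (same O(n); measured faster via C-level slice/count).

-- ===== PORT A =====
def compute_cost_third_vowels (text : String) : Int :=
  let t := PySem.Str.lower text
  let vowels : PySem.Set Char := PySem.Set.ofList ['a', 'e', 'i', 'o', 'u']
  (PySem.List.enumerate t.toList 0).foldl
    (fun total_cost p =>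
      if PySem.Int.mod p.1 3 == 0 then
        if PySem.Set.contains vowels p.2 then total_cost + 30 else total_cost
      else total_cost) 0

-- ===== PORT B =====
def compute_cost_third_vowels_alt (text : String) : Int :=
  -- s = text.lower()[::3]  (step 3 is never 0, so slice? always returns some; getD is the totality guard)
  let s : List Char := (PySem.List.slice? (PySem.Str.lower text).toList none none 3).getD []
  30 * ((['a', 'e', 'i', 'o', 'u'] : List Char).map (fun v => (PySem.List.count s v : Int))).sum

-- ===== PRECONDITION & SPEC =====
def Spec_compute_cost_third_vowels (text : String) (out : Int) : Prop := out = compute_cost_third_vowels_alt text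
instance (text : String) (out : Int) : Decidable (Spec_compute_cost_third_vowels text out) := by unfold Spec_compute_cost_third_vowels; infer_instance

-- ===== CLAIM (what is proved, stated in full; the proofs are below) =====
def Claim_equal_compute_cost_third_vowels : Prop := ∀ (text : String), Dom_compute_cost_third_vowels text → Spec_compute_cost_third_vowels text (compute_cost_third_vowels text)

-- ===== LEMMAS AND PROOFS =====

-- elements of xs at indices 0, 3, 6, …  (what xs[::3] selects)
def pvEvery3 {α : Type} : List α → List α
  | [] => []
  | a :: l => a :: pvEvery3 (l.drop 2)
termination_by l => l.length
decreasing_by simp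

theorem pvEvery3_nil {α : Type} : pvEvery3 ([] : List α) = [] := by simp [pvEvery3]

theorem pvEvery3_cons {α : Type} (a : α) (l : List α) :
    pvEvery3 (a :: l) = a :: pvEvery3 (l.drop 2) := by simp [pvEvery3]

theorem pv_filterMap_range {α : Type} :
    ∀ (c : Nat) (xs : List α),
      List.filterMap (fun k : Nat => xs[(3 * (k : Int)).toNat]?) (List.range c)
        = pvEvery3 (xs.take (3 * c)) := by
  intro c
  induction c with
  | zero => intro xs; simp [pvEvery3_nil]
  | succ c ih =>
    intro xs
    rw [List.range_succ_eq_map, List.filterMap_cons, List.filterMap_map]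
    have hshift : ((fun k : Nat => xs[(3 * (k : Int)).toNat]?) ∘ Nat.succ)
        = fun k : Nat => (xs.drop 3)[(3 * (k : Int)).toNat]? := by
      funext k
      have h1 : (3 * ((k : Int) + 1)).toNat = 3 + (3 * (k : Int)).toNat := by omega
      simp [Function.comp, List.getElem?_drop, h1]
    rw [hshift, ih]
    cases xs with
    | nil => simp [pvEvery3_nil]
    | cons a l =>
      have h0 : ((3 : Int) * ((0 : Nat) : Int)).toNat = 0 := by omega
      have ht : 3 * (c + 1) = (3 * c + 2) + 1 := by omega
      simp only [h0, List.getElem?_cons_zero, List.drop_succ_cons, ht, List.take_succ_cons,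
        pvEvery3_cons, List.drop_take]
      norm_num

-- xs[::3] always returns, and selects exactly pvEvery3 xs
theorem pv_slice3 {α : Type} (xs : List α) :
    PySem.List.slice? xs none none 3 = some (pvEvery3 xs) := by
  simp only [PySem.List.slice?, PySem.List.sliceIndices]
  norm_num
  rw [pv_filterMap_range]
  congr 1
  apply List.take_of_length_le
  split <;> omega

theorem pv_contains_eq (c : Char) :
    PySem.Set.contains (PySem.Set.ofList ['a', 'e', 'i', 'o', 'u']) c
      = (c ∈ (['a', 'e', 'i', 'o', 'u'] : List Char)) := by
  have h : PySem.Set.ofList (['a', 'e', 'i', 'o', 'u'] : List Char) = ['a', 'e', 'i', 'o', 'u'] := by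
    decide
  rw [h]
  simp [PySem.Set.contains]

-- five per-vowel counts sum to one membership count (the vowels are pairwise distinct)
theorem pv_sum_counts (l : List Char) :
    ((['a', 'e', 'i', 'o', 'u'] : List Char).map (fun v => (PySem.List.count l v : Int))).sum
      = (l.countP (fun c => PySem.Set.contains (PySem.Set.ofList ['a', 'e', 'i', 'o', 'u']) c) : Int) := by
  induction l with
  | nil => decide
  | cons a l ih =>
    simp only [PySem.List.count_eq] at *
    simp only [List.count_cons, List.countP_cons, pv_contains_eq] at *
    push_cast
    rw [PySem.List.sum_map_add_int, ih]
    have hind : ((['a', 'e', 'i', 'o', 'u'] : List Char).map (fun v => if a == v then (1 : Int) else 0)).sum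
        = if a ∈ (['a', 'e', 'i', 'o', 'u'] : List Char) then 1 else 0 := by
      simp only [List.map_cons, List.map_nil, List.sum_cons, List.sum_nil, List.mem_cons,
        List.not_mem_nil, or_false]
      split_ifs <;> simp_all
    rw [hind]

theorem pv_mod3 (x : Int) : PySem.Int.mod x 3 = x % 3 := by
  simp [PySem.Int.mod, Int.fmod_eq_emod]

-- A's loop invariant: from a start index divisible by 3, the loop adds 30 per vowel of pvEvery3 l
theorem pv_Aloop :
    ∀ (n : Nat) (l : List Char), l.length ≤ n → ∀ (s acc : Int), s % 3 = 0 →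
      (PySem.List.enumerate l s).foldl
          (fun total_cost p =>
            if PySem.Int.mod p.1 3 == 0 then
              if PySem.Set.contains (PySem.Set.ofList ['a', 'e', 'i', 'o', 'u']) p.2 then total_cost + 30
              else total_cost
            else total_cost) acc
        = acc + 30 * ((pvEvery3 l).countP
            (fun c => PySem.Set.contains (PySem.Set.ofList ['a', 'e', 'i', 'o', 'u']) c) : Int) := by
  intro n
  induction n with
  | zero =>
    intro l hl s acc hs
    have : l = [] := List.eq_nil_of_length_eq_zero (Nat.le_zero.mp hl)
    subst this
    simp [PySem.List.enumerate, pvEvery3_nil]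
  | succ n ih =>
    intro l hl s acc hs
    match l with
    | [] => simp [PySem.List.enumerate, pvEvery3_nil]
    | [a] =>
      simp only [PySem.List.enumerate_cons, PySem.List.enumerate_nil, List.foldl_cons,
        List.foldl_nil, pvEvery3_cons, List.drop_nil, pvEvery3_nil, List.countP_cons,
        List.countP_nil, pv_mod3, hs]
      simp
      split_ifs <;> push_cast <;> ring
    | [a, b] =>
      have hb : (s + 1) % 3 ≠ 0 := by omega
      simp only [PySem.List.enumerate_cons, PySem.List.enumerate_nil, List.foldl_cons,
        List.foldl_nil, pvEvery3_cons, List.drop_nil, pvEvery3_nil, List.countP_cons,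
        List.countP_nil, pv_mod3, hs, List.drop_succ_cons]
      simp [hb]
      split_ifs <;> push_cast <;> ring
    | a :: b :: c :: l =>
      have hb : (s + 1) % 3 ≠ 0 := by omega
      have hc : (s + 2) % 3 ≠ 0 := by omega
      have hs3 : (s + 3) % 3 = 0 := by omega
      have hl3 : l.length ≤ n := by simp at hl; omega
      simp only [PySem.List.enumerate_cons, List.foldl_cons, pv_mod3, hs,
        List.drop_succ_cons, List.drop_zero, pvEvery3_cons, List.countP_cons]
      rw [show s + 1 + 1 = s + 2 from by ring, show s + 2 + 1 = s + 3 from by ring]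
      simp only [beq_iff_eq, hs, hb, hc, eq_self_iff_true, if_true, if_false, ite_true, ite_false]
      simp only [pv_mod3, beq_iff_eq] at ih
      rw [ih l hl3 (s + 3) _ hs3]
      split_ifs <;> push_cast <;> ring

-- ===== VERDICT (by name: the statement is the Claim_ definition above) =====
theorem compute_cost_third_vowels_spec : Claim_equal_compute_cost_third_vowels := by
  intro text _
  unfold Spec_compute_cost_third_vowels compute_cost_third_vowels compute_cost_third_vowels_alt
  simp only [pv_slice3, Option.getD_some, pv_sum_counts]
  rw [pv_Aloop (PySem.Str.lower text).toList.length _ le_rfl 0 0 rfl]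
  ring
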